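-- pv_equiv track=rewrite | github.com/SimonG1972/compliance-os | scripts/search_chunks.py | within_window
-- ===== SOURCE A (Python) =====
-- def within_window(tokens, a, b, w):
--     if not tokens: return False
--     pos_a = [i for i,t in enumerate(tokens) if t == a]
--     pos_b = [i for i,t in enumerate(tokens) if t == b]
--     if not pos_a or not pos_b: return False
--     j = 0
--     for i in pos_a:
--         while j < len(pos_b) and pos_b[j] < i - w:
--             j += 1
--         k = j
--         while k < len(pos_b) and pos_b[k] <= i + w:
--             return True
--     return False
-- ===== SOURCE B (Python) =====
-- def within_window(tokens, a, b, w):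
--     # single streaming pass: track last-seen index of each target token
--     last_a = None
--     last_b = None
--     for i, t in enumerate(tokens):
--         if t == a:
--             last_a = i
--         if t == b:
--             last_b = i
--         if t == a and last_b is not None and i - last_b <= w:
--             return True
--         if t == b and last_a is not None and i - last_a <= w:
--             return True
--     return False
-- ===== Notes on version B (the rewrite author's own statement) =====
-- stated objective: simpler
-- what changed: Replaced A's pre-built position lists plus two-pointer merge with a single streaming pass that keeps only the last-seen index of each of the two tokens and checks the window on the fly.
import Mathlib
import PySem

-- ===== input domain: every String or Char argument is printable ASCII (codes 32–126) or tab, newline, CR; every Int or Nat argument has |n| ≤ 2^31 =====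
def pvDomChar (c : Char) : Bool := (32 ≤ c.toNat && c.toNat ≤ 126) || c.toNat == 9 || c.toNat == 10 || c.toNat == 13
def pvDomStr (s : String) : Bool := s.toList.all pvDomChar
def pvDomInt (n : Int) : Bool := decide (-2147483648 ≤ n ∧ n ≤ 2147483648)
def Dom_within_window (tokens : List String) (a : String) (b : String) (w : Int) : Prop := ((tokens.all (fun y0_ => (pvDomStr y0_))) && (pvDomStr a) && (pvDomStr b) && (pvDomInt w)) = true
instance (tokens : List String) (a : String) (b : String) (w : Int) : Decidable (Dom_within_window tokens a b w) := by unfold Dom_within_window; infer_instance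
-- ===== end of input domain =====

-- B replaces A's two position lists + two-pointer merge by one streaming pass keeping
-- the last-seen index of each token; same return value everywhere (objective: simpler).

-- ===== PORT A =====
-- the inner `while j < len(pos_b) and pos_b[j] < i - w: j += 1`
def wwSkip (pos_b : List Int) (bound : Int) (j : Nat) : Nat :=
  if h : j < pos_b.length then
    if pos_b[j] < bound then wwSkip pos_b bound (j + 1) else j
  else j
termination_by pos_b.length - j

-- the `for i in pos_a:` loop with its carried pointer j; the inner
-- `k = j; while k < len(pos_b) and pos_b[k] <= i + w: return True` returns True
-- on its first entered iteration, so it is the `if` below.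
def wwLoopA (pos_b : List Int) (w : Int) : List Int → Nat → Bool
  | [], _ => false
  | i :: rest, j =>
    let j' := wwSkip pos_b (i - w) j
    if h : j' < pos_b.length then
      if pos_b[j'] ≤ i + w then true else wwLoopA pos_b w rest j'
    else wwLoopA pos_b w rest j'

def wwPos (tokens : List String) (s : String) : List Int :=
  ((PySem.List.enumerate tokens 0).filter (fun p => p.2 == s)).map (·.1)

def within_window (tokens : List String) (a : String) (b : String) (w : Int) : Bool :=
  if tokens.isEmpty then false
  else
    let pos_a := wwPos tokens a
    let pos_b := wwPos tokens b
    if pos_a.isEmpty || pos_b.isEmpty then false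
    else wwLoopA pos_b w pos_a 0

-- ===== PORT B =====
def wwCheck (i : Int) (o : Option Int) (w : Int) : Bool :=
  match o with
  | some q => decide (i - q ≤ w)
  | none => false

def wwLoopB (a b : String) (w : Int) : List (Int × String) → Option Int → Option Int → Bool
  | [], _, _ => false
  | (i, t) :: rest, la0, lb0 =>
    let la := if t == a then some i else la0
    let lb := if t == b then some i else lb0
    if t == a && wwCheck i lb w then true
    else if t == b && wwCheck i la w then true
    else wwLoopB a b w rest la lb

def within_window_alt (tokens : List String) (a : String) (b : String) (w : Int) : Bool :=
  wwLoopB a b w (PySem.List.enumerate tokens 0) none none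

-- ===== PRECONDITION & SPEC =====
def Spec_within_window (tokens : List String) (a : String) (b : String) (w : Int) (out : Bool) : Prop := out = within_window_alt tokens a b w
instance (tokens : List String) (a : String) (b : String) (w : Int) (out : Bool) : Decidable (Spec_within_window tokens a b w out) := by unfold Spec_within_window; infer_instance

-- ===== CLAIM (what is proved, stated in full; the proofs are below) =====
def Claim_equal_within_window : Prop := ∀ (tokens : List String) (a : String) (b : String) (w : Int), Dom_within_window tokens a b w → Spec_within_window tokens a b w (within_window tokens a b w)

-- ===== LEMMAS AND PROOFS =====

theorem wwSkip_ge (pb : List Int) (bound : Int) (j : Nat) : j ≤ wwSkip pb bound j := by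
  fun_induction wwSkip pb bound j with
  | case1 j h hlt ih => omega
  | case2 j h hlt => omega
  | case3 j h => omega

theorem wwSkip_skipped (pb : List Int) (bound : Int) (j k : Nat) (hk : k < pb.length)
    (h1 : j ≤ k) (h2 : k < wwSkip pb bound j) : pb[k] < bound := by
  fun_induction wwSkip pb bound j with
  | case1 j h hlt ih =>
    rcases Nat.eq_or_lt_of_le h1 with rfl | h1'
    · exact hlt
    · exact ih h1' h2
  | case2 j h hlt => omega
  | case3 j h => omega

theorem wwSkip_stop (pb : List Int) (bound : Int) (j : Nat)
    (h : wwSkip pb bound j < pb.length) : ¬ pb[wwSkip pb bound j]'h < bound := by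
  fun_induction wwSkip pb bound j with
  | case1 j hj hlt ih => exact ih h
  | case2 j hj hlt => exact hlt
  | case3 j hj => omega

theorem wwLoopA_iff (pb : List Int) (w : Int) (la : List Int) (j : Nat)
    (hsa : la.Pairwise (· ≤ ·)) (hsb : pb.Pairwise (· ≤ ·))
    (hj : ∀ k (h : k < pb.length), k < j → ∀ p ∈ la, pb[k] < p - w) :
    wwLoopA pb w la j = true ↔
      ∃ p ∈ la, ∃ k, ∃ (h : k < pb.length), p - w ≤ pb[k] ∧ pb[k] ≤ p + w := by
  induction la generalizing j with
  | nil => simp [wwLoopA]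
  | cons i rest ih =>
    have hmono : ∀ p ∈ rest, i ≤ p := fun p hp => (List.pairwise_cons.mp hsa).1 p hp
    have hsa' : rest.Pairwise (· ≤ ·) := (List.pairwise_cons.mp hsa).2
    set j' := wwSkip pb (i - w) j with hj'
    have hjj' : j ≤ j' := wwSkip_ge pb (i - w) j
    have hj'' : ∀ k (h : k < pb.length), k < j' → ∀ p ∈ (i :: rest), pb[k] < p - w := by
      intro k hk hkj' p hp
      have hip : i ≤ p := by
        rcases List.mem_cons.mp hp with rfl | hp'
        · omega
        · exact hmono p hp'
      by_cases hkj : k < j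
      · exact hj k hk hkj p hp
      · have := wwSkip_skipped pb (i - w) j k hk (by omega) hkj'
        omega
    have hrec : ∀ k (h : k < pb.length), k < j' → ∀ p ∈ rest, pb[k] < p - w := by
      intro k hk hkj' p hp; exact hj'' k hk hkj' p (List.mem_cons_of_mem _ hp)
    have hbmono : ∀ k₁ k₂ (h₁ : k₁ < pb.length) (h₂ : k₂ < pb.length), k₁ ≤ k₂ → pb[k₁] ≤ pb[k₂] := by
      intro k₁ k₂ h₁ h₂ hle
      rcases Nat.eq_or_lt_of_le hle with rfl | hlt
      · exact le_refl _
      · exact List.pairwise_iff_getElem.mp hsb k₁ k₂ h₁ h₂ hlt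
    have hred : wwLoopA pb w (i :: rest) j =
        if h : j' < pb.length then
          if pb[j'] ≤ i + w then true else wwLoopA pb w rest j'
        else wwLoopA pb w rest j' := by rw [wwLoopA]
    rw [hred]
    by_cases h : j' < pb.length
    · simp only [dif_pos h]
      by_cases hle : pb[j'] ≤ i + w
      · simp only [if_pos hle, true_iff]
        refine ⟨i, List.mem_cons_self, j', h, ?_, hle⟩
        have hst := wwSkip_stop pb (i - w) j h
        simp only [← hj'] at hst
        omega
      · rw [if_neg hle, ih j' hsa' hrec]
        constructor
        · rintro ⟨p, hp, k, hk, hlo, hhi⟩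
          exact ⟨p, List.mem_cons_of_mem _ hp, k, hk, hlo, hhi⟩
        · rintro ⟨p, hp, k, hk, hlo, hhi⟩
          rcases List.mem_cons.mp hp with rfl | hp'
          · -- p = i: contradiction
            exfalso
            by_cases hkj : k < j'
            · have := hj'' k hk hkj p List.mem_cons_self; omega
            · have := hbmono j' k h hk (by omega); omega
          · exact ⟨p, hp', k, hk, hlo, hhi⟩
    · simp only [dif_neg h]
      rw [ih j' hsa' hrec]
      constructor
      · rintro ⟨p, hp, k, hk, hlo, hhi⟩
        exact ⟨p, List.mem_cons_of_mem _ hp, k, hk, hlo, hhi⟩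
      · rintro ⟨p, hp, k, hk, hlo, hhi⟩
        rcases List.mem_cons.mp hp with rfl | hp'
        · exfalso
          have hkj : k < j' := by omega
          have := hj'' k hk hkj p List.mem_cons_self; omega
        · exact ⟨p, hp', k, hk, hlo, hhi⟩

def WWMatch (tokens : List String) (a b : String) (w : Int) (p q : Nat) : Prop :=
  ∃ (hp : p < tokens.length) (hq : q < tokens.length),
    tokens[p] = a ∧ tokens[q] = b ∧ (p : Int) - q ≤ w ∧ (q : Int) - p ≤ w

theorem wwPos_mem (tokens : List String) (s : String) (x : Int) :
    x ∈ wwPos tokens s ↔ ∃ (k : Nat) (h : k < tokens.length), x = (k : Int) ∧ tokens[k] = s := by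
  unfold wwPos
  simp only [List.mem_map, List.mem_filter, PySem.List.mem_enumerate_iff]
  constructor
  · rintro ⟨⟨i, t⟩, ⟨⟨k, hk, hpair⟩, ht⟩, rfl⟩
    cases hpair
    exact ⟨k, hk, by simp, by simpa using ht⟩
  · rintro ⟨k, hk, rfl, hs⟩
    exact ⟨((k : Int), tokens[k]), ⟨⟨k, hk, by simp⟩, by simpa using hs⟩, rfl⟩

theorem wwPos_sorted (tokens : List String) (s : String) :
    (wwPos tokens s).Pairwise (· ≤ ·) := by
  unfold wwPos
  refine List.Pairwise.map _ ?_ ((PySem.List.pairwise_lt_enumerate tokens 0).filter _)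
  intro p q h
  exact le_of_lt h

theorem within_window_iff (tokens : List String) (a b : String) (w : Int) :
    within_window tokens a b w = true ↔ ∃ p q, WWMatch tokens a b w p q := by
  unfold within_window
  by_cases hemp : tokens.isEmpty
  · simp only [if_pos hemp, Bool.false_eq_true, false_iff]
    rintro ⟨p, q, hp, _⟩
    rw [List.isEmpty_iff] at hemp
    simp [hemp] at hp
  · simp only [if_neg hemp]
    by_cases hpe : (wwPos tokens a).isEmpty || (wwPos tokens b).isEmpty
    · simp only [if_pos hpe, Bool.false_eq_true, false_iff]
      rintro ⟨p, q, hp, hq, ha, hb, _⟩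
      rcases Bool.or_eq_true_iff.mp hpe with h | h <;> rw [List.isEmpty_iff] at h
      · exact (List.eq_nil_iff_forall_not_mem.mp h (p : Int)) ((wwPos_mem tokens a _).mpr ⟨p, hp, rfl, ha⟩)
      · exact (List.eq_nil_iff_forall_not_mem.mp h (q : Int)) ((wwPos_mem tokens b _).mpr ⟨q, hq, rfl, hb⟩)
    · simp only [if_neg hpe]
      rw [wwLoopA_iff _ _ _ _ (wwPos_sorted tokens a) (wwPos_sorted tokens b) (by omega)]
      constructor
      · rintro ⟨p, hp, k, hk, hlo, hhi⟩
        rcases (wwPos_mem tokens a p).mp hp with ⟨pi, hpi, rfl, hpa⟩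
        have hmem : (wwPos tokens b)[k] ∈ wwPos tokens b := List.getElem_mem hk
        rcases (wwPos_mem tokens b _).mp hmem with ⟨qi, hqi, heq, hqb⟩
        refine ⟨pi, qi, hpi, hqi, hpa, hqb, ?_, ?_⟩ <;> rw [heq] at hlo hhi <;> omega
      · rintro ⟨p, q, hp, hq, ha, hb, h1, h2⟩
        have hpm : (p : Int) ∈ wwPos tokens a := (wwPos_mem tokens a _).mpr ⟨p, hp, rfl, ha⟩
        have hqm : (q : Int) ∈ wwPos tokens b := (wwPos_mem tokens b _).mpr ⟨q, hq, rfl, hb⟩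
        rcases List.mem_iff_getElem.mp hqm with ⟨k, hk, hkq⟩
        refine ⟨(p : Int), hpm, k, hk, ?_, ?_⟩ <;> rw [hkq] <;> omega

def WWLast (tokens : List String) (s : String) (m : Nat) : Option Int → Prop
  | none => ∀ k (h : k < tokens.length), k < m → tokens[k] ≠ s
  | some p => ∃ (k : Nat) (h : k < tokens.length), k < m ∧ p = (k : Int) ∧ tokens[k] = s ∧
      ∀ k' (h' : k' < tokens.length), k' < m → tokens[k'] = s → k' ≤ k

theorem WWLast_step (tokens : List String) (s : String) (m : Nat) (o : Option Int)
    (hm : m < tokens.length) (ho : WWLast tokens s m o) :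
    WWLast tokens s (m + 1) (if tokens[m] == s then some (m : Int) else o) := by
  by_cases hs : tokens[m] = s
  · rw [if_pos (beq_iff_eq.mpr hs)]
    refine ⟨m, hm, by omega, rfl, hs, ?_⟩
    intro k' h' hk' _
    omega
  · rw [if_neg (by simpa using hs)]
    cases o with
    | none =>
      intro k h hk
      rcases Nat.lt_succ_iff_lt_or_eq.mp hk with hk' | rfl
      · exact ho k h hk'
      · exact hs
    | some p =>
      rcases ho with ⟨k, hk, hkm, rfl, hks, hmax⟩
      refine ⟨k, hk, by omega, rfl, hks, ?_⟩
      intro k' h' hk' hs'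
      rcases Nat.lt_succ_iff_lt_or_eq.mp hk' with hk'' | rfl
      · exact hmax k' h' hk'' hs'
      · exact absurd hs' hs

theorem wwLoopB_iff (tokens : List String) (a b : String) (w : Int) (m : Nat)
    (la lb : Option Int) (hla : WWLast tokens a m la) (hlb : WWLast tokens b m lb) :
    wwLoopB a b w (PySem.List.enumerate (tokens.drop m) m) la lb = true ↔
      ∃ p q, WWMatch tokens a b w p q ∧ (m ≤ p ∨ m ≤ q) := by
  induction hn : tokens.length - m generalizing m la lb with
  | zero =>
    have hm : tokens.length ≤ m := by omega
    rw [List.drop_eq_nil_of_le hm]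
    simp only [PySem.List.enumerate_nil, wwLoopB, Bool.false_eq_true, false_iff]
    rintro ⟨p, q, ⟨hp, hq, _⟩, hor⟩
    omega
  | succ n ih =>
    have hm : m < tokens.length := by omega
    rw [List.drop_eq_getElem_cons hm, PySem.List.enumerate_cons]
    set t := tokens[m] with ht
    set la' := (if t == a then some (m : Int) else la) with hla'
    set lb' := (if t == b then some (m : Int) else lb) with hlb'
    have hIa : WWLast tokens a (m + 1) la' := WWLast_step tokens a m la hm hla
    have hIb : WWLast tokens b (m + 1) lb' := WWLast_step tokens b m lb hm hlb
    have hred : wwLoopB a b w (((m : Int), t) :: PySem.List.enumerate (tokens.drop (m + 1)) ((m : Int) + 1)) la lb =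
        (if t == a && wwCheck (m : Int) lb' w then true
         else if t == b && wwCheck (m : Int) la' w then true
         else wwLoopB a b w (PySem.List.enumerate (tokens.drop (m + 1)) ((m : Int) + 1)) la' lb') := by
      rw [wwLoopB]
    have hcast : ((m : Int) + 1) = ((m + 1 : Nat) : Int) := by push_cast; ring
    by_cases hc1 : (t == a && wwCheck (m : Int) lb' w) = true
    · rw [hred, if_pos hc1]
      simp only [true_iff]
      rcases Bool.and_eq_true_iff.mp hc1 with ⟨hta, hchk⟩
      have hta' : tokens[m] = a := beq_iff_eq.mp hta
      cases hlbv : lb' with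
      | none => rw [hlbv] at hchk; simp [wwCheck] at hchk
      | some q0 =>
        rw [hlbv] at hchk
        have hle : (m : Int) - q0 ≤ w := by simpa [wwCheck] using hchk
        have := hIb; rw [hlbv] at this
        rcases this with ⟨k, hk, hkm, rfl, hkb, _⟩
        refine ⟨m, k, ⟨hm, hk, hta', hkb, ?_, ?_⟩, Or.inl le_rfl⟩ <;> omega
    · by_cases hc2 : (t == b && wwCheck (m : Int) la' w) = true
      · rw [hred, if_neg hc1, if_pos hc2]
        simp only [true_iff]
        rcases Bool.and_eq_true_iff.mp hc2 with ⟨htb, hchk⟩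
        have htb' : tokens[m] = b := beq_iff_eq.mp htb
        cases hlav : la' with
        | none => rw [hlav] at hchk; simp [wwCheck] at hchk
        | some p0 =>
          rw [hlav] at hchk
          have hle : (m : Int) - p0 ≤ w := by simpa [wwCheck] using hchk
          have := hIa; rw [hlav] at this
          rcases this with ⟨k, hk, hkm, rfl, hka, _⟩
          refine ⟨k, m, ⟨hk, hm, hka, htb', ?_, ?_⟩, Or.inr le_rfl⟩ <;> omega
      · rw [hred, if_neg hc1, if_neg hc2, hcast, ih (m + 1) la' lb' hIa hIb (by omega)]
        constructor
        · rintro ⟨p, q, hmch, hor⟩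
          exact ⟨p, q, hmch, by omega⟩
        · rintro ⟨p, q, hmch, hor⟩
          by_cases hbig : m + 1 ≤ p ∨ m + 1 ≤ q
          · exact ⟨p, q, hmch, hbig⟩
          · exfalso
            rcases hmch with ⟨hp, hq, hpa, hqb, h1, h2⟩
            have hpq : p ≤ m ∧ q ≤ m ∧ (p = m ∨ q = m) := by omega
            rcases hpq with ⟨hpm, hqm, hcase⟩
            rcases hcase with rfl | rfl
            · -- p = m: check1 should have fired
              apply hc1
              have hta : (t == a) = true := beq_iff_eq.mpr hpa
              rw [Bool.and_eq_true_iff]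
              refine ⟨hta, ?_⟩
              cases hlbv : lb' with
              | none =>
                exfalso
                have := hIb; rw [hlbv] at this
                exact this q hq (by omega) hqb
              | some q0 =>
                have := hIb; rw [hlbv] at this
                rcases this with ⟨k, hk, hkm, rfl, hkb, hmax⟩
                have hqk : q ≤ k := hmax q hq (by omega) hqb
                simp only [wwCheck, decide_eq_true_eq]
                omega
            · -- q = m: check2 should have fired
              apply hc2
              have htb : (t == b) = true := beq_iff_eq.mpr hqb
              rw [Bool.and_eq_true_iff]
              refine ⟨htb, ?_⟩
              cases hlav : la' with
              | none =>
                exfalso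
                have := hIa; rw [hlav] at this
                exact this p hp (by omega) hpa
              | some p0 =>
                have := hIa; rw [hlav] at this
                rcases this with ⟨k, hk, hkm, rfl, hka, hmax⟩
                have hpk : p ≤ k := hmax p hp (by omega) hpa
                simp only [wwCheck, decide_eq_true_eq]
                omega

theorem within_window_alt_iff (tokens : List String) (a b : String) (w : Int) :
    within_window_alt tokens a b w = true ↔ ∃ p q, WWMatch tokens a b w p q := by
  unfold within_window_alt
  have h0 : PySem.List.enumerate tokens 0 = PySem.List.enumerate (tokens.drop 0) (0 : Nat) := by simp
  rw [h0, wwLoopB_iff tokens a b w 0 none none (by intro k h hk; omega) (by intro k h hk; omega)]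
  constructor
  · rintro ⟨p, q, hmch, _⟩; exact ⟨p, q, hmch⟩
  · rintro ⟨p, q, hmch⟩; exact ⟨p, q, hmch, Or.inl (Nat.zero_le _)⟩

-- ===== VERDICT (by name: the statement is the Claim_ definition above) =====
theorem within_window_spec : Claim_equal_within_window := by
  intro tokens a b w _
  unfold Spec_within_window
  rw [Bool.eq_iff_iff, within_window_iff, within_window_alt_iff]
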